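-- pv_equiv track=rewrite | github.com/pypi-data/pypi-mirror-391 | packages/zenable-mcp/zenable_mcp-2.19.1-py3-none-any.whl/zenable_mcp/commands/install/hook.py | should_update_matcher
-- ===== SOURCE A (Python) =====
-- SUPPORTED_MATCHERS = ["Write", "Edit", "MultiEdit"]
--
-- def should_update_matcher(matcher: str) -> bool:
--     """Check if a matcher should be updated to include Write, Edit, and MultiEdit.
--
--     Args:
--         matcher: The matcher string to check
--
--     Returns:
--         True if the matcher should be updated
--     """
--     if not isinstance(matcher, str):
--         return False
--
--     parts = [part.strip() for part in matcher.split("|")]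
--     has_edit = "Edit" in parts
--     has_write = "Write" in parts
--     has_multiedit = "MultiEdit" in parts
--
--     # Already has all three, no update needed
--     if has_write and has_edit and has_multiedit:
--         return False
--
--     # Count how many of our supported matchers are present
--     supported_count = sum([has_write, has_edit, has_multiedit])
--
--     # If it has at least one of our matchers but not all
--     if supported_count > 0 and supported_count < 3:
--         # Check if there are any non-supported matchers
--         non_supported_matchers = [p for p in parts if p not in SUPPORTED_MATCHERS]
--
--         # Only update if there's at most 1 non-supported matcher
--         # This allows updating "Write|Read" or "Edit|Bash" but not "Edit|Foo|Bar|Write"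
--         if len(non_supported_matchers) <= 1:
--             return True
--
--     return False
-- ===== SOURCE B (Python) =====
-- SUPPORTED_MATCHERS = ["Write", "Edit", "MultiEdit"]
--
-- def should_update_matcher(matcher: str) -> bool:
--     """Single pass: collect the distinct supported matchers and count
--     unsupported parts (with duplicates), then decide from those two tallies."""
--     if not isinstance(matcher, str):
--         return False
--
--     present = set()
--     non_supported_count = 0
--     for part in matcher.split("|"):
--         p = part.strip()
--         if p in SUPPORTED_MATCHERS:
--             present.add(p)
--         else:
--             non_supported_count += 1
--
--     k = len(present)
--     if k == 3:
--         return False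
--     return 0 < k < 3 and non_supported_count <= 1
-- ===== Notes on version B (the rewrite author's own statement) =====
-- stated objective: alternative
-- what changed: A makes four separate scans over the parts list (three membership tests plus a filtering comprehension of non-supported parts); B makes a single fused pass over the split parts, stripping each part inside the loop while maintaining a set of supported matchers seen and a running count of non-supported parts, then decides from those two tallies.
import Mathlib
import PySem

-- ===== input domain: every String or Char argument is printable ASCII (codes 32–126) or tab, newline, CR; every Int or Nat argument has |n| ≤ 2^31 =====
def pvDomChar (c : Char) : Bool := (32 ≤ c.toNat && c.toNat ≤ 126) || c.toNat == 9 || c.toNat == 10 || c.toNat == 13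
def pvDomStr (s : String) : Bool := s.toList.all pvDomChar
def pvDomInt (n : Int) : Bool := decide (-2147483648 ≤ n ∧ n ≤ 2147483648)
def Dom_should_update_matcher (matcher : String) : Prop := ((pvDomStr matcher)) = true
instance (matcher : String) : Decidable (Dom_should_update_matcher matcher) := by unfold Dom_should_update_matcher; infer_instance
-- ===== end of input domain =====

-- B replaces A's four separate scans of the parts list (three membership tests plus a
-- filtering comprehension) by one fused pass that maintains a set of supported matchers
-- seen and a count of unsupported parts; objective: alternative decomposition.

-- ===== PORT A =====
def SUPPORTED_MATCHERS : List String := ["Write", "Edit", "MultiEdit"]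

def should_update_matcher (matcher : String) : Bool :=
  -- matcher.split("|"): the separator "|" is nonempty, so split? is always `some`
  let parts := ((PySem.Str.split? matcher "|").getD []).map PySem.Str.strip
  let has_edit := parts.contains "Edit"
  let has_write := parts.contains "Write"
  let has_multiedit := parts.contains "MultiEdit"
  if has_write && has_edit && has_multiedit then false
  else
    let supported_count : Int :=
      (if has_write then 1 else 0) + (if has_edit then 1 else 0) + (if has_multiedit then 1 else 0)
    if supported_count > 0 ∧ supported_count < 3 then
      let non_supported_matchers := parts.filter (fun p => !(SUPPORTED_MATCHERS.contains p))
      if PySem.List.len non_supported_matchers ≤ 1 then true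
      else false
    else false

-- ===== PORT B =====
def should_update_matcher_alt (matcher : String) : Bool :=
  -- one loop over matcher.split("|"), stripping inside the loop
  let st := ((PySem.Str.split? matcher "|").getD []).foldl
    (fun (st : PySem.Set String × Int) part =>
      let p := PySem.Str.strip part
      if SUPPORTED_MATCHERS.contains p then (PySem.Set.add st.1 p, st.2)
      else (st.1, st.2 + 1))
    (PySem.Set.empty, 0)
  let k := PySem.Set.len st.1
  if k == 3 then false
  else decide (0 < k ∧ k < 3 ∧ st.2 ≤ 1)

-- ===== PRECONDITION & SPEC =====
def Spec_should_update_matcher (matcher : String) (out : Bool) : Prop := out = should_update_matcher_alt matcher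
instance (matcher : String) (out : Bool) : Decidable (Spec_should_update_matcher matcher out) := by unfold Spec_should_update_matcher; infer_instance

-- ===== CLAIM (what is proved, stated in full; the proofs are below) =====
def Claim_equal_should_update_matcher : Prop := ∀ (matcher : String), Dom_should_update_matcher matcher → Spec_should_update_matcher matcher (should_update_matcher matcher)

-- ===== LEMMAS AND PROOFS =====

-- B's loop, split into its two components over an arbitrary list of parts.
theorem foldB_eq {l : List String} {s : PySem.Set String} {n : Int} :
    l.foldl (fun (st : PySem.Set String × Int) part =>
        let p := PySem.Str.strip part
        if SUPPORTED_MATCHERS.contains p then (PySem.Set.add st.1 p, st.2)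
        else (st.1, st.2 + 1)) (s, n)
    = (((l.map PySem.Str.strip).filter (fun p => SUPPORTED_MATCHERS.contains p)).foldl PySem.Set.add s,
       n + ((l.map PySem.Str.strip).countP (fun p => !(SUPPORTED_MATCHERS.contains p)) : Int)) := by
  induction l generalizing s n with
  | nil => simp
  | cons x xs ih =>
    by_cases h : SUPPORTED_MATCHERS.contains (PySem.Str.strip x) = true
    · simp only [List.foldl_cons, List.map_cons, List.filter_cons, List.countP_cons, h,
        Bool.not_true, if_true, Bool.false_eq_true, if_false]
      rw [ih]
      simp
    · rw [Bool.not_eq_true] at h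
      simp only [List.foldl_cons, List.map_cons, List.filter_cons, List.countP_cons, h,
        Bool.not_false, Bool.false_eq_true, if_true, if_false]
      rw [ih]
      push_cast
      ring_nf

-- the distinct supported matchers seen, counted via the three membership booleans
theorem len_supported_set (parts : List String) :
    (PySem.Set.ofList (parts.filter (fun p => decide (p ∈ SUPPORTED_MATCHERS)))).length
    = (if "Write" ∈ parts then 1 else 0) + (if "Edit" ∈ parts then 1 else 0)
      + (if "MultiEdit" ∈ parts then 1 else 0) := by
  have hperm : (PySem.Set.ofList (parts.filter (fun p => decide (p ∈ SUPPORTED_MATCHERS)))).Perm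
      (SUPPORTED_MATCHERS.filter (fun m => decide (m ∈ parts))) := by
    rw [List.perm_ext_iff_of_nodup (PySem.Set.nodup_ofList _)
      (List.Nodup.filter _ (by decide))]
    intro a
    simp only [PySem.Set.mem_ofList, List.mem_filter, SUPPORTED_MATCHERS,
      List.mem_cons, List.not_mem_nil, or_false, decide_eq_true_eq]
    tauto
  rw [hperm.length_eq]
  simp only [SUPPORTED_MATCHERS, List.filter]
  by_cases hw : "Write" ∈ parts <;>
  by_cases he : "Edit" ∈ parts <;>
  by_cases hm : "MultiEdit" ∈ parts <;>
    simp [hw, he, hm]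

-- ===== VERDICT (by name: the statement is the Claim_ definition above) =====
theorem should_update_matcher_spec : Claim_equal_should_update_matcher := by
  intro matcher _
  unfold Spec_should_update_matcher should_update_matcher should_update_matcher_alt
  simp only [foldB_eq]
  set parts := ((PySem.Str.split? matcher "|").getD []).map PySem.Str.strip with hp
  simp only [List.contains_eq_mem, PySem.Set.empty, ← PySem.Set.ofList_eq_foldl, PySem.Set.len,
    PySem.List.len_eq, len_supported_set, List.countP_eq_length_filter, zero_add]
  by_cases hw : "Write" ∈ parts <;>
  by_cases he : "Edit" ∈ parts <;>
  by_cases hm : "MultiEdit" ∈ parts <;>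
    simp [hw, he, hm]
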